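-- pv_equiv track=rewrite | github.com/zhangchn/melon | backend/thumbnail_service.py | _make_xstack_layout
-- ===== SOURCE A (Python) =====
-- def _make_xstack_layout(n, cols=4):
--     layout = []
--
--     for i in range(n):
--         col = i % cols
--         row = i // cols
--
--         # build x
--         if col == 0:
--             x = "0"
--         else:
--             x = "+".join([f"w{row*cols + j}" for j in range(col)])
--
--         # build y
--         if row == 0:
--             y = "0"
--         else:
--             y = "+".join([f"h{r*cols}" for r in range(row)])
--
--         layout.append(f"{x}_{y}")
--
--     return "|".join(layout)
-- ===== SOURCE B (Python) =====
-- def _make_xstack_layout(n, cols=4):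
--     # Nested rows x columns loops with running x/y prefix strings instead of
--     # recomputing each join from scratch.  A non-positive column count cannot
--     # describe a grid: treat it as an empty layout.
--     if cols <= 0:
--         return ""
--     cells = []
--     y = "0"
--     for row in range((n + cols - 1) // cols):
--         base = row * cols
--         x = "0"
--         for col in range(min(cols, n - base)):
--             cells.append(x + "_" + y)
--             x = ("w%d" % base) if col == 0 else x + ("+w%d" % (base + col))
--         y = ("h%d" % base) if row == 0 else y + ("+h%d" % base)
--     return "|".join(cells)
-- ===== Notes on version B (the rewrite author's own statement) =====
-- stated objective: alternative
-- what changed: Replaces A's flat modular loop, which re-joins every x/y coordinate list from scratch per cell, with nested row/column loops that maintain running x and y prefix strings (appending one token per step) and handle the partial last row explicitly.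
-- outside the precondition, e.g. on _make_xstack_layout(5, -4): A returns '0_0|_|_|_|0_', B returns ''; on _make_xstack_layout(1, -4): A returns '0_0', B returns ''
import Mathlib
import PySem

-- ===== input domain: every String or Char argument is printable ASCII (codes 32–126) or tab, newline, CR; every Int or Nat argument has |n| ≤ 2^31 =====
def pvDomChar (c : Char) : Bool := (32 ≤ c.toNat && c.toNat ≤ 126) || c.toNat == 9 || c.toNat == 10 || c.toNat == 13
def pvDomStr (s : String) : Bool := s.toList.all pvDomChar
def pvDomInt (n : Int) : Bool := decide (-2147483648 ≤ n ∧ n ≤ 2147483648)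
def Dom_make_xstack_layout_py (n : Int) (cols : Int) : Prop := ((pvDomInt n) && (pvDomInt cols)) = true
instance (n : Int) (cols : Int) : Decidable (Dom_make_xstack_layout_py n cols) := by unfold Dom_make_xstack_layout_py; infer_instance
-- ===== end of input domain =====

-- B builds the layout by nested row/column loops with running x/y prefix strings
-- instead of A's flat modular loop that re-joins every coordinate from scratch.

-- ===== PORT A =====
def make_xstack_layout_py (n : Int) (cols : Int) : String :=
  let layout : List String := (PySem.List.pyRange 0 n 1).foldl (fun layout i =>
    let col := PySem.Int.mod i cols
    let row := PySem.Int.floordiv i cols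
    let x : String := if col = 0 then "0"
      else PySem.Str.join "+" ((PySem.List.pyRange 0 col 1).map (fun j => "w" ++ PySem.Int.toStr (row * cols + j)))
    let y : String := if row = 0 then "0"
      else PySem.Str.join "+" ((PySem.List.pyRange 0 row 1).map (fun r => "h" ++ PySem.Int.toStr (r * cols)))
    layout ++ [x ++ "_" ++ y]) []
  PySem.Str.join "|" layout

-- ===== PORT B =====
def make_xstack_layout_py_alt (n : Int) (cols : Int) : String :=
  if cols ≤ 0 then ""
  else
    let st := (PySem.List.pyRange 0 (PySem.Int.floordiv (n + cols - 1) cols) 1).foldl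
      (fun (st : List String × String) row =>
        let base := row * cols
        let inner := (PySem.List.pyRange 0 (min cols (n - base)) 1).foldl
          (fun (st2 : List String × String) col =>
            (st2.1 ++ [st2.2 ++ "_" ++ st.2],
             if col = 0 then "w" ++ PySem.Int.toStr base
             else st2.2 ++ "+w" ++ PySem.Int.toStr (base + col)))
          (st.1, "0")
        (inner.1,
         if row = 0 then "h" ++ PySem.Int.toStr base
         else st.2 ++ "+h" ++ PySem.Int.toStr base))
      ([], "0")
    PySem.Str.join "|" st.1

-- ===== PRECONDITION & SPEC =====
-- Pre_ excludes cols < 0 with n > 0, where A's floor division/modulo by the negative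
-- column count produce accidental coordinate strings (empty x/y pieces from empty
-- token ranges); B treats a non-positive column count as an empty layout.
def Pre_make_xstack_layout_py (n : Int) (cols : Int) : Prop := n ≤ 0 ∨ 1 ≤ cols
instance (n : Int) (cols : Int) : Decidable (Pre_make_xstack_layout_py n cols) := by unfold Pre_make_xstack_layout_py; infer_instance
def pvWitness_make_xstack_layout_py : Int × Int := (8, 3)

def Spec_make_xstack_layout_py (n : Int) (cols : Int) (out : String) : Prop := out = make_xstack_layout_py_alt n cols
instance (n : Int) (cols : Int) (out : String) : Decidable (Spec_make_xstack_layout_py n cols out) := by unfold Spec_make_xstack_layout_py; infer_instance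

-- ===== CLAIM (what is proved, stated in full; the proofs are below) =====
def Claim_equal_make_xstack_layout_py : Prop := ∀ (n : Int) (cols : Int), Dom_make_xstack_layout_py n cols → Pre_make_xstack_layout_py n cols → Spec_make_xstack_layout_py n cols (make_xstack_layout_py n cols)

-- ===== LEMMAS AND PROOFS =====

-- the coordinate strings of cell (row r, column k), for column count c
def pvWtok (b : Int) (j : Nat) : String := "w" ++ PySem.Int.toStr (b + (j : Int))
def pvXA (b : Int) (k : Nat) : String :=
  if k = 0 then "0" else PySem.Str.join "+" ((List.range k).map (pvWtok b))
def pvYA (c : Int) (r : Nat) : String :=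
  if r = 0 then "0" else PySem.Str.join "+" ((List.range r).map (fun (q : Nat) => "h" ++ PySem.Int.toStr ((q : Int) * c)))
def pvCell (c : Int) (r k : Nat) : String := pvXA ((r : Int) * c) k ++ "_" ++ pvYA c r

lemma pv_chars_join_append_singleton (sep : List Char) (l : List (List Char)) (x : List Char) :
    PySem.Chars.join sep (l ++ [x]) = if l = [] then x else PySem.Chars.join sep l ++ sep ++ x := by
  induction l with
  | nil => simp [PySem.Chars.join_singleton]
  | cons a l ih =>
    cases l with
    | nil => simp [PySem.Chars.join_cons_cons, PySem.Chars.join_singleton]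
    | cons b l2 =>
      rw [List.cons_append, List.cons_append, PySem.Chars.join_cons_cons, ← List.cons_append, ih]
      simp [PySem.Chars.join_cons_cons, List.append_assoc]

lemma pv_join_append_singleton (sep : String) (l : List String) (x : String) :
    PySem.Str.join sep (l ++ [x]) = if l = [] then x else PySem.Str.join sep l ++ sep ++ x := by
  apply String.toList_injective
  by_cases hl : l = []
  · simp [hl, PySem.Str.toList_join, PySem.Chars.join_singleton]
  · have hl' : ¬ (l.map String.toList = []) := by simpa using hl
    simp [hl, hl', PySem.Str.toList_join, pv_chars_join_append_singleton]

lemma pv_join_nil (sep : String) : PySem.Str.join sep ([] : List String) = "" := by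
  apply String.toList_injective
  simp [PySem.Str.toList_join, PySem.Chars.join_nil]

lemma pv_pyRange_toNat (v : Int) : PySem.List.pyRange 0 v 1 = (List.range v.toNat).map (fun (k : Nat) => (k : Int)) := by
  rw [PySem.List.pyRange_one]; simp

lemma pvXA_succ (base : Int) (M : Nat) :
    pvXA base (M + 1) = if (M : Int) = 0 then "w" ++ PySem.Int.toStr base
      else pvXA base M ++ "+w" ++ PySem.Int.toStr (base + (M : Int)) := by
  unfold pvXA
  rw [List.range_succ, List.map_append, List.map_singleton, pv_join_append_singleton]
  by_cases hM : M = 0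
  · subst hM; simp [pvWtok]
  · have h1 : ¬ ((List.range M).map (pvWtok base) = []) := by simp [hM, List.range_eq_nil]
    have h2 : ¬ ((M : Int) = 0) := by exact_mod_cast hM
    simp only [h1, hM, if_false, h2]
    apply String.toList_injective
    simp [pvWtok]

lemma pvYA_succ (c : Int) (M : Nat) :
    pvYA c (M + 1) = if (M : Int) = 0 then "h" ++ PySem.Int.toStr ((M : Int) * c)
      else pvYA c M ++ "+h" ++ PySem.Int.toStr ((M : Int) * c) := by
  unfold pvYA
  rw [List.range_succ, List.map_append, List.map_singleton, pv_join_append_singleton]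
  by_cases hM : M = 0
  · subst hM; simp
  · have h1 : ¬ ((List.range M).map (fun (q : Nat) => "h" ++ PySem.Int.toStr ((q : Int) * c)) = []) := by
      simp [hM, List.range_eq_nil]
    have h2 : ¬ ((M : Int) = 0) := by exact_mod_cast hM
    simp only [h1, hM, if_false, h2]
    apply String.toList_injective
    simp

-- the inner (column) loop of B appends one row of cells and accumulates the x prefix
lemma pv_inner (y : String) (base : Int) : ∀ (M : Nat) (prev : List String),
    ((List.range M).map (fun (k : Nat) => (k : Int))).foldl
      (fun (st2 : List String × String) col =>
        (st2.1 ++ [st2.2 ++ "_" ++ y],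
         if col = 0 then "w" ++ PySem.Int.toStr base
         else st2.2 ++ "+w" ++ PySem.Int.toStr (base + col)))
      (prev, "0")
    = (prev ++ (List.range M).map (fun k => pvXA base k ++ "_" ++ y), pvXA base M) := by
  intro M
  induction M with
  | zero => intro prev; simp [pvXA]
  | succ M ih =>
    intro prev
    rw [List.range_succ, List.map_append, List.foldl_append, ih]
    simp only [List.map_singleton, List.foldl_cons, List.foldl_nil]
    refine Prod.ext ?_ ?_
    · simp
    · exact (pvXA_succ base M).symm

-- the outer (row) loop of B: cells so far plus the running y prefix
lemma pv_outer (n cols : Int) : ∀ (Rn : Nat),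
    ((List.range Rn).map (fun (k : Nat) => (k : Int))).foldl
      (fun (st : List String × String) row =>
        let base := row * cols
        let inner := (PySem.List.pyRange 0 (min cols (n - base)) 1).foldl
          (fun (st2 : List String × String) col =>
            (st2.1 ++ [st2.2 ++ "_" ++ st.2],
             if col = 0 then "w" ++ PySem.Int.toStr base
             else st2.2 ++ "+w" ++ PySem.Int.toStr (base + col)))
          (st.1, "0")
        (inner.1,
         if row = 0 then "h" ++ PySem.Int.toStr base
         else st.2 ++ "+h" ++ PySem.Int.toStr base))
      ([], "0")
    = ((List.range Rn).flatMap
        (fun (r : Nat) => (List.range (min cols (n - (r : Int) * cols)).toNat).map (fun k => pvCell cols r k)),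
       pvYA cols Rn) := by
  intro Rn
  induction Rn with
  | zero => simp [pvYA]
  | succ R ih =>
    rw [List.range_succ, List.map_append, List.foldl_append, ih]
    simp only [List.map_singleton, List.foldl_cons, List.foldl_nil]
    rw [pv_pyRange_toNat, pv_inner]
    rw [List.flatMap_append, List.flatMap_singleton]
    refine Prod.ext ?_ ?_
    · simp [pvCell]
    · exact (pvYA_succ cols R).symm

-- the per-cell string A computes at index i = r*C + k equals pvCell
lemma pv_Abody_eq (cols : Int) (C : Nat) (hcols : (C : Int) = cols) (i : Nat) :
    ((if PySem.Int.mod (i : Int) cols = 0 then "0"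
      else PySem.Str.join "+" ((PySem.List.pyRange 0 (PySem.Int.mod (i : Int) cols) 1).map
        (fun j => "w" ++ PySem.Int.toStr (PySem.Int.floordiv (i : Int) cols * cols + j)))) ++ "_" ++
     (if PySem.Int.floordiv (i : Int) cols = 0 then "0"
      else PySem.Str.join "+" ((PySem.List.pyRange 0 (PySem.Int.floordiv (i : Int) cols) 1).map
        (fun r => "h" ++ PySem.Int.toStr (r * cols)))))
    = pvCell cols (i / C) (i % C) := by
  subst hcols
  rw [PySem.Int.mod_natCast, PySem.Int.floordiv_natCast, pv_pyRange_toNat, pv_pyRange_toNat]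
  unfold pvCell pvXA pvYA pvWtok
  simp only [Int.toNat_natCast, List.map_map, Function.comp_def, Nat.cast_eq_zero]

-- generic append-only loop (A's single pass)
lemma pv_append_loop (f : Int → String) : ∀ (N : Nat) (acc : List String),
    ((List.range N).map (fun (k : Nat) => (k : Int))).foldl (fun acc i => acc ++ [f i]) acc
      = acc ++ (List.range N).map (fun (k : Nat) => f (k : Int)) := by
  intro N
  induction N with
  | zero => intro acc; simp
  | succ N ih =>
    intro acc
    rw [List.range_succ, List.map_append, List.foldl_append, ih]
    simp

-- enumeration: the rows×columns double loop lists exactly the cells 0..N-1 in order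
lemma pv_enum (c : Int) (C N : Nat) (hC : 0 < C) : ∀ R : Nat,
    (List.range R).flatMap (fun r => (List.range (min C (N - r * C))).map (fun k => pvCell c r k))
      = (List.range (min N (R * C))).map (fun i => pvCell c (i / C) (i % C)) := by
  intro R
  induction R with
  | zero => simp
  | succ R ih =>
    have key : min N (R * C + C) = min N (R * C) + min C (N - R * C) := by
      generalize R * C = p; omega
    rw [List.range_succ, List.flatMap_append, List.flatMap_singleton, ih, Nat.succ_mul, key,
      List.range_add, List.map_append, List.map_map]
    congr 1
    by_cases hb : min C (N - R * C) = 0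
    · simp [hb]
    · have ha : min N (R * C) = R * C := by
        have : R * C < N := by generalize hp : R * C = p at hb ⊢; omega
        omega
      apply List.map_congr_left
      intro k hk
      have hkC : k < C := by have := List.mem_range.1 hk; omega
      have h1 : (R * C + k) / C = R := by
        rw [mul_comm R C, Nat.mul_add_div hC]
        simp [Nat.div_eq_of_lt hkC]
      have h2 : (R * C + k) % C = k := by
        rw [mul_comm R C, Nat.mul_add_mod, Nat.mod_eq_of_lt hkC]
      simp only [Function.comp_apply, ha, h1, h2]

-- characterisation of A for a positive column count
lemma pv_A_char (n cols : Int) (hc : 1 ≤ cols) :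
    make_xstack_layout_py n cols
      = PySem.Str.join "|" ((List.range n.toNat).map (fun i => pvCell cols (i / cols.toNat) (i % cols.toNat))) := by
  unfold make_xstack_layout_py
  rw [pv_pyRange_toNat]
  show PySem.Str.join "|"
      (((List.range n.toNat).map (fun (k : Nat) => (k : Int))).foldl
        (fun acc i => acc ++
          [(if PySem.Int.mod i cols = 0 then "0"
            else PySem.Str.join "+" ((PySem.List.pyRange 0 (PySem.Int.mod i cols) 1).map
              (fun j => "w" ++ PySem.Int.toStr (PySem.Int.floordiv i cols * cols + j)))) ++ "_" ++
           (if PySem.Int.floordiv i cols = 0 then "0"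
            else PySem.Str.join "+" ((PySem.List.pyRange 0 (PySem.Int.floordiv i cols) 1).map
              (fun r => "h" ++ PySem.Int.toStr (r * cols))))]) [])
    = _
  rw [pv_append_loop]
  rw [List.nil_append]
  congr 1
  apply List.map_congr_left
  intro i _
  exact pv_Abody_eq cols cols.toNat (Int.toNat_of_nonneg (by omega)) i

-- characterisation of B for a positive column count
lemma pv_B_char (n cols : Int) (hc : ¬ cols ≤ 0) :
    make_xstack_layout_py_alt n cols
      = PySem.Str.join "|" ((List.range (PySem.Int.floordiv (n + cols - 1) cols).toNat).flatMap
          (fun (r : Nat) => (List.range (min cols (n - (r : Int) * cols)).toNat).map (fun k => pvCell cols r k))) := by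
  unfold make_xstack_layout_py_alt
  rw [if_neg hc, pv_pyRange_toNat, pv_outer]

-- ===== VERDICT (by name: the statement is the Claim_ definition above) =====
theorem make_xstack_layout_py_spec : Claim_equal_make_xstack_layout_py := by
  intro n cols _ hpre
  unfold Spec_make_xstack_layout_py
  by_cases hc0 : cols ≤ 0
  · have hn : n ≤ 0 := by rcases hpre with h | h <;> omega
    unfold make_xstack_layout_py make_xstack_layout_py_alt
    rw [if_pos hc0, PySem.List.pyRange_one_eq_nil hn]
    simpa using (pv_join_nil "|")
  · have hc1 : 1 ≤ cols := by omega
    rw [pv_A_char n cols hc1, pv_B_char n cols hc0]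
    by_cases hn0 : n ≤ 0
    · have hR : PySem.Int.floordiv (n + cols - 1) cols ≤ 0 := by
        by_contra h
        have : (1 : Int) * cols ≤ n + cols - 1 :=
          (PySem.Int.le_floordiv_iff_mul_le (by omega)).1 (by omega)
        omega
      rw [Int.toNat_of_nonpos hR, Int.toNat_of_nonpos hn0]
      simp
    · -- main case: n ≥ 1, cols ≥ 1
      have hbr := (PySem.Int.floordiv_eq_iff_of_pos (a := n + cols - 1) (b := cols)
        (q := PySem.Int.floordiv (n + cols - 1) cols) (by omega)).1 rfl
      set R := PySem.Int.floordiv (n + cols - 1) cols with hRdef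
      have hR0 : 0 ≤ R := by nlinarith [hbr.1, hbr.2]
      congr 1
      have hmin : ∀ r : Nat, (min cols (n - (r : Int) * cols)).toNat
          = min cols.toNat (n.toNat - r * cols.toNat) := by
        intro r
        have h1 : ((r * cols.toNat : Nat) : Int) = (r : Int) * cols := by
          push_cast [Int.toNat_of_nonneg (by omega : (0:Int) ≤ cols)]; ring
        generalize hp : (r * cols.toNat : Nat) = p at *
        omega
      simp only [hmin]
      rw [pv_enum cols cols.toNat n.toNat (by omega) R.toNat]
      have hNle : n.toNat ≤ R.toNat * cols.toNat := by
        have h1 : ((R.toNat * cols.toNat : Nat) : Int) = R * cols := by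
          push_cast [Int.toNat_of_nonneg hR0, Int.toNat_of_nonneg (by omega : (0:Int) ≤ cols)]; ring
        have h2 : n ≤ R * cols := by nlinarith [hbr.2]
        generalize hp : (R.toNat * cols.toNat : Nat) = p at *
        omega
      rw [min_eq_left hNle]
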